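-- pv_equiv track=rewrite | github.com/victorchalen98/Boot.dev | 1.LearnToCodeInPython/9.Lists/l10_counting_the_items_in_a_list.py | get_item_counts
-- ===== SOURCE A (Python) =====
-- def get_item_counts(items):
--     potion_count = 0
--     bread_count = 0
--     shortsword_count = 0
--
--     # don't touch above this line
--
--     for i in range(0, len(items)):
--         if(items[i] == "Potion"):
--             potion_count += 1
--         elif (items[i] == "Bread"):
--             bread_count += 1
--         elif (items[i] == "Shortsword"):
--             shortsword_count += 1
--
--
--     # don't touch below this line
--
--     return potion_count, bread_count, shortsword_count
-- ===== SOURCE B (Python) =====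
-- def get_item_counts(items):
--     return items.count("Potion"), items.count("Bread"), items.count("Shortsword")
-- ===== Notes on version B (the rewrite author's own statement) =====
-- stated objective: idiomatic
-- what changed: Replaces the index-based single loop with branch bookkeeping by three built-in list.count scans, one per item name.
import Mathlib
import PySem

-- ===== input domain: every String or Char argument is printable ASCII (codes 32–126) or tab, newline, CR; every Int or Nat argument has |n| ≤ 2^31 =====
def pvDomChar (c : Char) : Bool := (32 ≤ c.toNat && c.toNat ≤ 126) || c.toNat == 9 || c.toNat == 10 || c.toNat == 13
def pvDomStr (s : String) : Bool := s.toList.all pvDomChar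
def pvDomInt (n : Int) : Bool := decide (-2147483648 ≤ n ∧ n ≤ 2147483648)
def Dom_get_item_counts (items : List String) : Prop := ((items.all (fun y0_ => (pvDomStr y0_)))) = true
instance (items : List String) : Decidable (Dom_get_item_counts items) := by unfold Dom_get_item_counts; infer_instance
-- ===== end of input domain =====

-- B replaces A's single indexed loop with branch bookkeeping by three built-in count scans (idiomatic; same cost).

-- ===== PORT A =====
-- loop body: the if/elif chain bumping one of the three counters
def getItemCountsStep (s : Int × Int × Int) (x : String) : Int × Int × Int :=
  if x == "Potion" then (s.1 + 1, s.2.1, s.2.2)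
  else if x == "Bread" then (s.1, s.2.1 + 1, s.2.2)
  else if x == "Shortsword" then (s.1, s.2.1, s.2.2 + 1)
  else s

-- for i in range(0, len(items)): <if/elif chain on items[i]>
def get_item_counts (items : List String) : Int × Int × Int :=
  (PySem.List.pyRange 0 (PySem.List.len items) 1).foldl
    (fun s i => getItemCountsStep s (PySem.List.pyGetD items i ""))
    (0, 0, 0)

-- ===== PORT B =====
def get_item_counts_alt (items : List String) : Int × Int × Int :=
  ((PySem.List.count items "Potion" : Int),
   (PySem.List.count items "Bread" : Int),
   (PySem.List.count items "Shortsword" : Int))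

-- ===== PRECONDITION & SPEC =====
def Spec_get_item_counts (items : List String) (out : Int × Int × Int) : Prop := out = get_item_counts_alt items
instance (items : List String) (out : Int × Int × Int) : Decidable (Spec_get_item_counts items out) := by unfold Spec_get_item_counts; infer_instance

-- ===== CLAIM (what is proved, stated in full; the proofs are below) =====
def Claim_equal_get_item_counts : Prop := ∀ (items : List String), Dom_get_item_counts items → Spec_get_item_counts items (get_item_counts items)

-- ===== LEMMAS AND PROOFS =====
theorem get_item_counts_fold (l : List String) (a b c : Int) :
    l.foldl getItemCountsStep (a, b, c)
    = (a + (l.count "Potion" : Int), b + (l.count "Bread" : Int), c + (l.count "Shortsword" : Int)) := by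
  induction l generalizing a b c with
  | nil => simp
  | cons h t ih =>
      rw [List.foldl_cons]
      by_cases h1 : h = "Potion"
      · rw [show getItemCountsStep (a, b, c) h = (a + 1, b, c) by simp [getItemCountsStep, h1], ih]
        simp [List.count_cons, h1]; ring
      · by_cases h2 : h = "Bread"
        · rw [show getItemCountsStep (a, b, c) h = (a, b + 1, c) by simp [getItemCountsStep, h1, h2], ih]
          simp [List.count_cons, h1, h2]; ring
        · by_cases h3 : h = "Shortsword"
          · rw [show getItemCountsStep (a, b, c) h = (a, b, c + 1) by simp [getItemCountsStep, h1, h2, h3], ih]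
            simp [List.count_cons, h1, h2, h3]; ring
          · rw [show getItemCountsStep (a, b, c) h = (a, b, c) by simp [getItemCountsStep, h1, h2, h3], ih]
            simp [List.count_cons, h1, h2, h3]

-- ===== VERDICT (by name: the statement is the Claim_ definition above) =====
theorem get_item_counts_spec : Claim_equal_get_item_counts := by
  intro items _
  unfold Spec_get_item_counts get_item_counts get_item_counts_alt
  rw [PySem.List.foldl_pyRange_zero_pyGetD items "" (f := getItemCountsStep)]
  rw [get_item_counts_fold]
  simp [PySem.List.count_eq]
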